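-- pv_equiv track=rewrite | github.com/Xsolai/TimeGlobeWhatsappAssistant | app/utils/message_queue.py | clean_last_tool_messages
-- ===== SOURCE A (Python) =====
-- def clean_last_tool_messages(history, window=5):
--     """
--     Check the last `window` messages and remove any 'tool' message
--     that is not immediately after a 'tool_calls' message.
--     """
--     start = max(0, len(history) - window)
--     i = start
--     while i < len(history):
--         if history[i]['role'] == 'tool':
--             if i == 0 or history[i-1]['role'] != 'tool_calls':
--                 history.pop(i)
--                 # After popping, don't increment i, as the next item shifts into this index
--                 continue
--         i += 1
--     return history
-- ===== SOURCE B (Python) =====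
-- def clean_last_tool_messages(history, window=5):
--     """
--     Check the last `window` messages and remove any 'tool' message
--     that is not immediately after a 'tool_calls' message.
--     """
--     start = max(0, len(history) - window)
--     kept = [msg for j, msg in enumerate(history[start:], start)
--             if msg['role'] != 'tool' or (j > 0 and history[j - 1]['role'] == 'tool_calls')]
--     history[start:] = kept
--     return history
-- ===== Notes on version B (the rewrite author's own statement) =====
-- stated objective: simpler
-- what changed: Replaces the in-place pop-and-rescan while loop (re-examining shifted indices against the mutated list) with a single forward comprehension that precomputes the survivors reading predecessors from the original list, then splices them back with one slice assignment.
import Mathlib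
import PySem

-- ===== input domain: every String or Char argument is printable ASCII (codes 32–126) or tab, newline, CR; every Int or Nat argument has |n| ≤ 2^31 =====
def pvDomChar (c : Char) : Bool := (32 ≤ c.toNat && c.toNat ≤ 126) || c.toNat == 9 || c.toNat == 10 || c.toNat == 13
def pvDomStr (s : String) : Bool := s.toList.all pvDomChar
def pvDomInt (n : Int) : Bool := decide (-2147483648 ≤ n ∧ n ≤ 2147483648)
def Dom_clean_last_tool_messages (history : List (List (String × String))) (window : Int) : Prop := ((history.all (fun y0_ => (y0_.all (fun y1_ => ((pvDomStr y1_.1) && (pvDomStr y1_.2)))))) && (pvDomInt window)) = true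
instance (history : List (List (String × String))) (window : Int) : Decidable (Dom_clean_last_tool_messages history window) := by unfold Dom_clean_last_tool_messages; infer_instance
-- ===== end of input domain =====

-- B replaces A's pop-and-rescan while loop by one forward comprehension over the window (reading
-- predecessors from the original list) plus a single slice assignment: simpler, same result.
-- Both Pythons mutate `history` in place and return it; the final list contents coincide, so the
-- mutation side effect is identical as well.

-- ===== PORT A =====

-- msg['role'] (first-match assoc-list lookup; Pre_ guarantees the key is present where A reads it)
def pvRole (m : List (String × String)) : String := (m.lookup "role").getD ""

-- the while loop: `i` scans current indices, pop(i) = eraseIdx, else i += 1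
def pvALoop (hist : List (List (String × String))) (i : Nat) : List (List (String × String)) :=
  if h : i < hist.length then
    if pvRole hist[i] = "tool" ∧ (i = 0 ∨ pvRole (hist.getD (i - 1) []) ≠ "tool_calls") then
      pvALoop (hist.eraseIdx i) i
    else
      pvALoop hist (i + 1)
  else hist
termination_by hist.length - i
decreasing_by
  · simp [List.length_eraseIdx_of_lt h]; omega
  · omega

def clean_last_tool_messages (history : List (List (String × String))) (window : Int) : List (List (String × String)) :=
  pvALoop history (max 0 ((history.length : Int) - window)).toNat

-- ===== PORT B =====

def clean_last_tool_messages_alt (history : List (List (String × String))) (window : Int) : List (List (String × String)) :=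
  let start := (max 0 ((history.length : Int) - window)).toNat
  let kept := ((PySem.List.enumerate (history.drop start) (start : Int)).filter
    (fun jm => (pvRole jm.2 != "tool") ||
      (decide (0 < jm.1) && (pvRole (PySem.List.pyGetD history (jm.1 - 1) []) == "tool_calls")))).map (fun jm => jm.2)
  history.take start ++ kept

-- ===== PRECONDITION & SPEC =====

-- Python A raises KeyError when a message it reads lacks the 'role' key; it reads every message
-- from index start = max(0, len-window) on, and message start-1 exactly when start > 0 and
-- message start has role 'tool'.  Pre_ admits precisely the inputs where all those reads succeed.
def Pre_clean_last_tool_messages (history : List (List (String × String))) (window : Int) : Prop :=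
  let start := (max 0 ((history.length : Int) - window)).toNat
  (∀ m ∈ history.drop start, (m.lookup "role").isSome) ∧
  (start = 0 ∨ history.length ≤ start ∨ pvRole (history.getD start []) ≠ "tool" ∨
    ((history.getD (start - 1) []).lookup "role").isSome)
instance (history : List (List (String × String))) (window : Int) : Decidable (Pre_clean_last_tool_messages history window) := by unfold Pre_clean_last_tool_messages; infer_instance

def pvWitness_clean_last_tool_messages : (List (List (String × String))) × Int :=
  ([[("role", "tool_calls")], [("role", "tool")], [("role", "user")]], 5)

def Spec_clean_last_tool_messages (history : List (List (String × String))) (window : Int) (out : List (List (String × String))) : Prop := out = clean_last_tool_messages_alt history window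
instance (history : List (List (String × String))) (window : Int) (out : List (List (String × String))) : Decidable (Spec_clean_last_tool_messages history window out) := by unfold Spec_clean_last_tool_messages; infer_instance

-- ===== CLAIM (what is proved, stated in full; the proofs are below) =====
def Claim_equal_clean_last_tool_messages : Prop := ∀ (history : List (List (String × String))) (window : Int), Dom_clean_last_tool_messages history window → Pre_clean_last_tool_messages history window → Spec_clean_last_tool_messages history window (clean_last_tool_messages history window)

-- ===== LEMMAS AND PROOFS =====

-- the survivors of the suffix, with `p` = role of the element currently preceding the scan
-- (A's semantics: on removal the carried predecessor stays `p`)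
def pvFiltA (p : String) : List (List (String × String)) → List (List (String × String))
  | [] => []
  | m :: rest =>
    if pvRole m = "tool" ∧ p ≠ "tool_calls" then pvFiltA p rest
    else m :: pvFiltA (pvRole m) rest

-- B's semantics: the predecessor is always the original previous element
def pvFiltB (p : String) : List (List (String × String)) → List (List (String × String))
  | [] => []
  | m :: rest =>
    if pvRole m = "tool" ∧ p ≠ "tool_calls" then pvFiltB (pvRole m) rest
    else m :: pvFiltB (pvRole m) rest

def pvPrev (hist : List (List (String × String))) (i : Nat) : String :=
  if i = 0 then "" else pvRole (hist.getD (i - 1) [])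

theorem pvFiltA_congr (p q : String) (h : (p = "tool_calls") ↔ (q = "tool_calls")) :
    ∀ xs, pvFiltA p xs = pvFiltA q xs := by
  intro xs
  induction xs generalizing p q with
  | nil => rfl
  | cons m rest ih =>
    simp only [pvFiltA]
    by_cases hm : pvRole m = "tool"
    · by_cases hp : p = "tool_calls"
      · have hq : q = "tool_calls" := h.mp hp
        simp [hm, hp, hq]
      · have hq : ¬ q = "tool_calls" := fun hq => hp (h.mpr hq)
        simp [hm, hp, hq, ih p q h]
    · simp [hm]

theorem pvFiltA_eq_pvFiltB (p : String) (xs : List (List (String × String))) :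
    pvFiltA p xs = pvFiltB p xs := by
  induction xs generalizing p with
  | nil => rfl
  | cons m rest ih =>
    simp only [pvFiltA, pvFiltB]
    by_cases hc : pvRole m = "tool" ∧ p ≠ "tool_calls"
    · rw [if_pos hc, if_pos hc, ← ih (pvRole m)]
      exact pvFiltA_congr p (pvRole m) (by constructor <;> intro hh <;> [exact absurd hh hc.2; exact absurd (hc.1 ▸ hh) (by decide)]) rest
    · rw [if_neg hc, if_neg hc, ih (pvRole m)]

-- A's loop computes take i ++ pvFiltA (pvPrev i) (drop i)
theorem pvALoop_eq (hist : List (List (String × String))) (i : Nat) :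
    pvALoop hist i = hist.take i ++ pvFiltA (pvPrev hist i) (hist.drop i) := by
  by_cases h : i < hist.length
  · rw [pvALoop, dif_pos h]
    have hdrop : hist.drop i = hist[i] :: hist.drop (i + 1) := List.drop_eq_getElem_cons h
    have hcond : (pvRole hist[i] = "tool" ∧ (i = 0 ∨ pvRole (hist.getD (i - 1) []) ≠ "tool_calls"))
        ↔ (pvRole hist[i] = "tool" ∧ pvPrev hist i ≠ "tool_calls") := by
      unfold pvPrev
      by_cases hi : i = 0
      · simp [hi]
      · simp [hi]
    by_cases hc : pvRole hist[i] = "tool" ∧ (i = 0 ∨ pvRole (hist.getD (i - 1) []) ≠ "tool_calls")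
    · rw [if_pos hc]
      have herase : hist.eraseIdx i = hist.take i ++ hist.drop (i + 1) := List.eraseIdx_eq_take_drop_succ hist i
      have ih := pvALoop_eq (hist.eraseIdx i) i
      rw [ih, herase]
      have hlen : (hist.take i).length = i := List.length_take_of_le (Nat.le_of_lt h)
      have htake : (hist.take i ++ hist.drop (i + 1)).take i = hist.take i := by
        rw [List.take_append_of_le_length (by omega), List.take_take]
        simp
      have hdrop2 : (hist.take i ++ hist.drop (i + 1)).drop i = hist.drop (i + 1) := by
        rw [List.drop_append_of_le_length (by omega)]
        simp
      have hprev : pvPrev (hist.take i ++ hist.drop (i + 1)) i = pvPrev hist i := by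
        unfold pvPrev
        by_cases hi : i = 0
        · simp [hi]
        · have h1 : i - 1 < (hist.take i).length := by omega
          simp only [hi]
          rw [List.getD_eq_getElem?_getD, List.getD_eq_getElem?_getD,
            List.getElem?_append_left h1, List.getElem?_take_of_lt (by omega)]
      rw [htake, hdrop2, hprev, hdrop]
      rw [pvFiltA, if_pos (hcond.mp hc)]
    · rw [if_neg hc]
      have ih := pvALoop_eq hist (i + 1)
      rw [ih]
      have htake : hist.take (i + 1) = hist.take i ++ [hist[i]] := List.take_succ_eq_append_getElem h
      have hprev : pvPrev hist (i + 1) = pvRole hist[i] := by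
        unfold pvPrev
        simp only [Nat.add_sub_cancel, if_neg (Nat.succ_ne_zero i)]
        rw [List.getD_eq_getElem?_getD, List.getElem?_eq_getElem h]
        rfl
      rw [htake, hprev, hdrop, pvFiltA, if_neg (fun hx => hc (hcond.mpr hx))]
      simp only [List.append_assoc, List.singleton_append]
  · rw [pvALoop, dif_neg h]
    have : hist.drop i = [] := List.drop_eq_nil_of_le (Nat.le_of_not_lt h)
    rw [this]
    simp [pvFiltA, List.take_of_length_le (Nat.le_of_not_lt h)]
termination_by hist.length - i
decreasing_by
  all_goals first
    | (simp [List.length_eraseIdx_of_lt h]; omega)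
    | omega

-- B's enumerate-filter over the suffix computes pvFiltB (pvPrev s) (drop s)
theorem pvBFilter_eq (hist : List (List (String × String))) (s : Nat) :
    (((PySem.List.enumerate (hist.drop s) (s : Int)).filter
      (fun jm => (pvRole jm.2 != "tool") ||
        (decide (0 < jm.1) && (pvRole (PySem.List.pyGetD hist (jm.1 - 1) []) == "tool_calls")))).map (fun jm => jm.2))
    = pvFiltB (pvPrev hist s) (hist.drop s) := by
  by_cases h : s < hist.length
  · have hdrop : hist.drop s = hist[s] :: hist.drop (s + 1) := List.drop_eq_getElem_cons h
    rw [hdrop, PySem.List.enumerate_cons, List.filter_cons]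
    have ih := pvBFilter_eq hist (s + 1)
    have hcast : ((s : Int) + 1) = ((s + 1 : Nat) : Int) := by push_cast; ring
    have hprev : pvPrev hist (s + 1) = pvRole hist[s] := by
      unfold pvPrev
      simp only [Nat.add_sub_cancel, if_neg (Nat.succ_ne_zero s)]
      rw [List.getD_eq_getElem?_getD, List.getElem?_eq_getElem h]
      rfl
    have hpred : ((pvRole hist[s] != "tool") ||
        (decide (0 < (s : Int)) && (pvRole (PySem.List.pyGetD hist ((s : Int) - 1) []) == "tool_calls")))
        = !decide (pvRole hist[s] = "tool" ∧ pvPrev hist s ≠ "tool_calls") := by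
      unfold pvPrev
      by_cases hs : s = 0
      · subst hs
        by_cases hm : pvRole hist[0] = "tool" <;> simp [hm]
      · have hs' : 0 < s := Nat.pos_of_ne_zero hs
        have h0 : (0 : Int) < (s : Int) := by exact_mod_cast hs'
        have hidx : ((s : Int) - 1) = ((s - 1 : Nat) : Int) := by omega
        have hr : ∀ r : String, (decide (0 < s) && (r == "tool_calls")) = decide (r = "tool_calls") := by
          intro r
          rw [decide_eq_true hs', Bool.true_and, beq_eq_decide]
        rw [hidx, PySem.List.pyGetD_natCast]
        by_cases hm : pvRole hist[s] = "tool" <;>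
          by_cases hp : pvRole (hist.getD (s - 1) []) = "tool_calls" <;>
            simp [hm, hs] <;>
            exact hr _
    rw [hcast]
    rw [hpred]
    by_cases hc : pvRole hist[s] = "tool" ∧ pvPrev hist s ≠ "tool_calls"
    · have hb : (!decide (pvRole hist[s] = "tool" ∧ pvPrev hist s ≠ "tool_calls")) = false := by
        simp [hc]
      rw [hb, if_neg Bool.false_ne_true, ih, pvFiltB, if_pos hc, hprev]
    · have hb : (!decide (pvRole hist[s] = "tool" ∧ pvPrev hist s ≠ "tool_calls")) = true := by
        rw [decide_eq_false hc]
        rfl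
      rw [hb, if_pos rfl, List.map_cons, ih, pvFiltB, if_neg hc, hprev]
  · have hnil : hist.drop s = [] := List.drop_eq_nil_of_le (Nat.le_of_not_lt h)
    rw [hnil]
    rfl
termination_by hist.length - s
decreasing_by omega

-- ===== VERDICT (by name: the statement is the Claim_ definition above) =====
theorem clean_last_tool_messages_spec : Claim_equal_clean_last_tool_messages := by
  intro history window _ _
  unfold Spec_clean_last_tool_messages
  simp only [clean_last_tool_messages, clean_last_tool_messages_alt]
  rw [pvALoop_eq, pvBFilter_eq, pvFiltA_eq_pvFiltB]
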